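-- pv_equiv track=rewrite | github.com/alexcelewicz/MAIAChat-Desktop | worker.py | _create_response_summary
-- ===== SOURCE A (Python) =====
-- def _create_response_summary(response: str, max_tokens: int) -> str:
--     """
--     Create a concise summary of an agent response.
--
--     Args:
--         response: Original response text
--         max_tokens: Maximum tokens for summary
--
--     Returns:
--         Summary of the response
--     """
--     # Simple extractive summarization - take key sentences
--     sentences = response.replace('\n', ' ').split('. ')
--
--     # Prioritize sentences with key indicators
--     key_indicators = ['conclusion', 'result', 'answer', 'solution', 'recommendation',
--                      'important', 'key', 'main', 'primary', 'essential']
--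
--     scored_sentences = []
--     for sentence in sentences:
--         score = 0
--         sentence_lower = sentence.lower()
--         for indicator in key_indicators:
--             if indicator in sentence_lower:
--                 score += 1
--         scored_sentences.append((score, sentence))
--
--     # Sort by score and take top sentences that fit
--     scored_sentences.sort(key=lambda x: x[0], reverse=True)
--
--     summary = ""
--     for score, sentence in scored_sentences:
--         if len(summary + sentence) < max_tokens * 4:  # Rough token estimation
--             summary += sentence + ". "
--         else:
--             break
--
--     if not summary:
--         # Fallback: take first few sentences
--         summary = '. '.join(sentences[:2]) + "."
--
--     return summary.strip()
-- ===== SOURCE B (Python) =====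
-- def _create_response_summary(response: str, max_tokens: int) -> str:
--     """Multi-pass extractive summary: for each score level 10..0 scan the sentences
--     and greedily take those at that level; no sort, no auxiliary structure."""
--     parts = response.replace('\n', ' ').split('. ')
--
--     key_indicators = ['conclusion', 'result', 'answer', 'solution', 'recommendation',
--                       'important', 'key', 'main', 'primary', 'essential']
--
--     def score_of(part):
--         low = part.lower()
--         return len([ind for ind in key_indicators if ind in low])
--
--     acc = ""
--     done = False
--     for level in range(10, -1, -1):
--         for part in parts:
--             if score_of(part) != level:
--                 continue
--             if len(acc + part) < max_tokens * 4:
--                 acc += part + ". "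
--             else:
--                 done = True
--                 break
--         if done:
--             break
--
--     if not acc:
--         acc = '. '.join(parts[:2]) + "."
--
--     return acc.strip()
-- ===== Notes on version B (the rewrite author's own statement) =====
-- stated objective: alternative
-- what changed: Replaces the comparison sort of scored sentences by eleven filtering passes over the sentence list, one per score level from 10 down to 0, greedily taking each matching sentence and breaking out of both loops at the first non-fit; same fallback and strip, no sort call and no score tuples.
import Mathlib
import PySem

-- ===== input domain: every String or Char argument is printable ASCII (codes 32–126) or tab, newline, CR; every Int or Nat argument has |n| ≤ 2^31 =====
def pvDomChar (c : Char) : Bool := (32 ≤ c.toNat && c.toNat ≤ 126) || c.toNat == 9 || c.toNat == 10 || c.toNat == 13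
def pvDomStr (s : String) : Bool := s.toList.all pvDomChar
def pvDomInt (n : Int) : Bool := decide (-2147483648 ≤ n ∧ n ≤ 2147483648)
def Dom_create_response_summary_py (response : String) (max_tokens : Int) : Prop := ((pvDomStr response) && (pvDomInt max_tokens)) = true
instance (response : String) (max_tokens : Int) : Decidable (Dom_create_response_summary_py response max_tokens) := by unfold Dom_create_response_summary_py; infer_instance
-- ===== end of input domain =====

-- B replaces A's stable sort of scored sentences by eleven filtering passes over the
-- sentence list, one per score level 10..0 (a different decomposition, no sort call);
-- same return value everywhere.

-- ===== PORT A =====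
def pvIndicators : List (List Char) :=
  ["conclusion".toList, "result".toList, "answer".toList, "solution".toList, "recommendation".toList,
   "important".toList, "key".toList, "main".toList, "primary".toList, "essential".toList]

-- A's scoring loop: score += 1 for each indicator contained in sentence.lower()
def pvScoreA (sentence : List Char) : Int :=
  let sentence_lower := PySem.Chars.lower sentence
  pvIndicators.foldl (fun score indicator => if PySem.Chars.isIn indicator sentence_lower then score + 1 else score) 0

-- A's greedy loop over the sorted scored sentences (break = return the accumulator)
def pvTakeA (m : Int) : List (Int × List Char) → List Char → List Char
  | [], summary => summary
  | (_, sentence) :: rest, summary =>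
    if (PySem.Chars.len (summary ++ sentence) : Int) < m * 4 then
      pvTakeA m rest (summary ++ sentence ++ ('.' :: ' ' :: []))
    else summary

def create_response_summary_py (response : String) (max_tokens : Int) : String :=
  let sentences := PySem.Chars.splitOn (PySem.Chars.replace response.toList ['\n'] [' ']) ('.' :: ' ' :: [])
  let scored_sentences := sentences.map (fun sentence => (pvScoreA sentence, sentence))
  let sorted_sentences := PySem.List.sorted scored_sentences (fun x => x.1) true
  let summary := pvTakeA max_tokens sorted_sentences []
  let summary := if summary = [] then
      PySem.Chars.join ('.' :: ' ' :: []) (PySem.List.slice sentences none (some 2)) ++ ['.']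
    else summary
  String.ofList (PySem.Chars.strip summary)

-- ===== PORT B =====
-- B's scoring helper: len([ind for ind in key_indicators if ind in low])
def pvScoreOf (part : List Char) : Int :=
  let low := PySem.Chars.lower part
  ((pvIndicators.filter (fun ind => PySem.Chars.isIn ind low)).length : Int)

-- one pass over the parts at a given score level; Bool = the 'done' flag set by the break
def pvPassB (m level : Int) : List (List Char) → List Char → List Char × Bool
  | [], acc => (acc, false)
  | part :: rest, acc =>
    if pvScoreOf part ≠ level then pvPassB m level rest acc     -- continue
    else if (PySem.Chars.len (acc ++ part) : Int) < m * 4 then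
      pvPassB m level rest (acc ++ part ++ ('.' :: ' ' :: []))
    else (acc, true)                                            -- break: set done

-- the outer loop over the levels 10,9,…,0, stopping when a pass set 'done'
def pvLevelsB (m : Int) (parts : List (List Char)) : List Int → List Char → List Char
  | [], acc => acc
  | level :: ls, acc =>
    let r := pvPassB m level parts acc
    if r.2 then r.1 else pvLevelsB m parts ls r.1

def create_response_summary_py_alt (response : String) (max_tokens : Int) : String :=
  let parts := PySem.Chars.splitOn (PySem.Chars.replace response.toList ['\n'] [' ']) ('.' :: ' ' :: [])
  let acc := pvLevelsB max_tokens parts (PySem.List.pyRange 10 (-1) (-1)) []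
  let acc := if acc = [] then
      PySem.Chars.join ('.' :: ' ' :: []) (PySem.List.slice parts none (some 2)) ++ ['.']
    else acc
  String.ofList (PySem.Chars.strip acc)

-- ===== PRECONDITION & SPEC =====
def Spec_create_response_summary_py (response : String) (max_tokens : Int) (out : String) : Prop := out = create_response_summary_py_alt response max_tokens
instance (response : String) (max_tokens : Int) (out : String) : Decidable (Spec_create_response_summary_py response max_tokens out) := by unfold Spec_create_response_summary_py; infer_instance

-- ===== CLAIM (what is proved, stated in full; the proofs are below) =====
def Claim_equal_create_response_summary_py : Prop := ∀ (response : String) (max_tokens : Int), Dom_create_response_summary_py response max_tokens → Spec_create_response_summary_py response max_tokens (create_response_summary_py response max_tokens)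

-- ===== LEMMAS AND PROOFS =====

-- the two scoring decompositions count the same indicators
theorem pvScore_eq (s : List Char) : pvScoreA s = pvScoreOf s := by
  simp [pvScoreA, pvScoreOf, PySem.List.foldl_if_add_one, List.countP_eq_length_filter]

theorem pvScore_bounds (s : List Char) : 0 ≤ pvScoreOf s ∧ pvScoreOf s ≤ 10 := by
  have h := List.length_filter_le
    (l := pvIndicators) (p := fun ind => PySem.Chars.isIn ind (PySem.Chars.lower s))
  have hlen : pvIndicators.length = 10 := by decide
  simp only [pvScoreOf]
  omega

-- insertBy goes to the very front when it must come before everything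
theorem pvInsertBy_front {α : Type} (before : α → α → Bool) (x : α) (ys : List α)
    (h : ∀ y ∈ ys, before x y = true) :
    PySem.List.insertBy before x ys = x :: ys := by
  cases ys with
  | nil => rfl
  | cons y ys => simp [PySem.List.insertBy, h y (by simp)]

-- insertBy skips a prefix it does not come before
theorem pvInsertBy_skip {α : Type} (before : α → α → Bool) (x : α) (pre suf : List α)
    (h : ∀ y ∈ pre, before x y = false) :
    PySem.List.insertBy before x (pre ++ suf) = pre ++ PySem.List.insertBy before x suf := by
  induction pre with
  | nil => rfl
  | cons y pre ih =>
    simp only [List.cons_append, PySem.List.insertBy, h y (by simp)]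
    simp only [Bool.false_eq_true, if_false]
    rw [ih (fun z hz => h z (by simp [hz]))]

-- inserting x into a bucket concatenation appends it at the end of its own bucket
theorem pvInsertBy_flatMap {α : Type} (key : α → Int) (x : α) (ks : List Int) (l : List α)
    (hks : ks.Pairwise (fun a b => b < a)) (hx : key x ∈ ks) :
    PySem.List.insertBy (fun a b => decide (key b < key a)) x
      (ks.flatMap (fun k => l.filter (fun a => key a == k)))
    = ks.flatMap (fun k => (l ++ [x]).filter (fun a => key a == k)) := by
  induction ks with
  | nil => simp at hx
  | cons k ks ih =>
    have hlt : ∀ j ∈ ks, j < k := by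
      intro j hj; exact (List.pairwise_cons.mp hks).1 j hj
    simp only [List.flatMap_cons]
    by_cases hk : key x = k
    · have hrest : ∀ y ∈ ks.flatMap (fun k => l.filter (fun a => key a == k)),
          (decide (key y < key x)) = true := by
        intro y hy
        obtain ⟨j, hj, hyj⟩ := List.mem_flatMap.mp hy
        have : key y = j := by simpa using (List.of_mem_filter hyj)
        simp [this, hk, hlt j hj]
      rw [pvInsertBy_skip _ _ _ _ (by
        intro y hy
        have : key y = k := by simpa using (List.of_mem_filter hy)
        simp [this, hk])]
      rw [pvInsertBy_front _ _ _ hrest]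
      have h1 : (l ++ [x]).filter (fun a => key a == k) = l.filter (fun a => key a == k) ++ [x] := by
        simp [List.filter_append, hk]
      have h2 : ∀ j ∈ ks, (l ++ [x]).filter (fun a => key a == j) = l.filter (fun a => key a == j) := by
        intro j hj
        have : key x ≠ j := by have := hlt j hj; omega
        simp [List.filter_append, this]
      rw [h1]
      have h3 : ks.flatMap (fun k => (l ++ [x]).filter (fun a => key a == k))
          = ks.flatMap (fun k => l.filter (fun a => key a == k)) := by
        simp only [List.flatMap_def]
        rw [List.map_congr_left h2]
      rw [h3]
      simp
    · have hx' : key x ∈ ks := (List.mem_cons.mp hx).resolve_left hk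
      have hxk : key x < k := hlt _ hx'
      rw [pvInsertBy_skip _ _ _ _ (by
        intro y hy
        have : key y = k := by simpa using (List.of_mem_filter hy)
        simp [this]; omega)]
      rw [ih (List.pairwise_cons.mp hks).2 hx']
      have : (l ++ [x]).filter (fun a => key a == k) = l.filter (fun a => key a == k) := by
        simp [List.filter_append, hk]
      rw [this]

-- Python's stable descending sort IS the bucket concatenation, highest score first
theorem pvSorted_eq_flatMap {α : Type} (key : α → Int) (l : List α) (ks : List Int)
    (hks : ks.Pairwise (fun a b => b < a)) (hl : ∀ a ∈ l, key a ∈ ks) :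
    PySem.List.sorted l key true = ks.flatMap (fun k => l.filter (fun a => key a == k)) := by
  induction l using List.reverseRecOn with
  | nil => rw [PySem.List.sorted_rev_eq_foldl_insertBy]; simp
  | append_singleton l x ih =>
    rw [PySem.List.sorted_rev_eq_foldl_insertBy, List.foldl_append]
    simp only [List.foldl_cons, List.foldl_nil]
    rw [← PySem.List.sorted_rev_eq_foldl_insertBy]
    rw [ih (fun a ha => hl a (by simp [ha]))]
    exact pvInsertBy_flatMap key x ks l hks (hl x (by simp))

-- proof-only helper: the fit-test loop over a bucket, with the 'break' flag
def pvRun (m : Int) : List (List Char) → List Char → List Char × Bool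
  | [], acc => (acc, false)
  | part :: rest, acc =>
    if (PySem.Chars.len (acc ++ part) : Int) < m * 4 then
      pvRun m rest (acc ++ part ++ ('.' :: ' ' :: []))
    else (acc, true)

-- B's pass with its 'continue' branch is the fit-test loop over the filtered parts
theorem pvPassB_filter (m k : Int) (xs : List (List Char)) (acc : List Char) :
    pvPassB m k xs acc = pvRun m (xs.filter (fun s => pvScoreOf s == k)) acc := by
  induction xs generalizing acc with
  | nil => rfl
  | cons x xs ih =>
    by_cases hs : pvScoreOf x = k
    · simp only [pvPassB, hs, ne_eq, not_true_eq_false, if_false, List.filter_cons,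
        beq_self_eq_true, if_true, pvRun]
      split_ifs with h
      · exact ih _
      · rfl
    · simp only [pvPassB, hs, ne_eq, not_false_eq_true, if_true, List.filter_cons]
      have : (pvScoreOf x == k) = false := by simpa using hs
      rw [this]
      exact ih acc

-- A's greedy loop over (bucket ++ rest) = the fit-test loop on the bucket, then continue/stop
theorem pvTakeA_append (m : Int) (ps t : List (Int × List Char)) (acc : List Char) :
    pvTakeA m (ps ++ t) acc =
      (if (pvRun m (ps.map (fun p => p.2)) acc).2
       then (pvRun m (ps.map (fun p => p.2)) acc).1
       else pvTakeA m t (pvRun m (ps.map (fun p => p.2)) acc).1) := by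
  induction ps generalizing acc with
  | nil => simp [pvRun]
  | cons p ps ih =>
    obtain ⟨sc, s⟩ := p
    by_cases h : (PySem.Chars.len (acc ++ s) : Int) < m * 4
    · simp only [List.cons_append, List.map_cons, pvTakeA, pvRun, if_pos h]
      exact ih _
    · simp only [List.cons_append, List.map_cons, pvTakeA, pvRun, if_neg h]
      simp

-- B's level loops equal A's single loop over the flattened buckets
theorem pvLevelsB_eq (m : Int) (parts : List (List Char)) :
    ∀ (ks : List Int) (acc : List Char),
      pvLevelsB m parts ks acc =
        pvTakeA m (ks.flatMap (fun k =>
          (parts.map (fun s => (pvScoreA s, s))).filter (fun p => p.1 == k))) acc := by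
  intro ks
  induction ks with
  | nil => intro acc; simp [pvLevelsB, pvTakeA]
  | cons k ks ih =>
    intro acc
    have hbucket :
        ((parts.map (fun s => (pvScoreA s, s))).filter (fun p => p.1 == k)).map (fun p => p.2)
          = parts.filter (fun s => pvScoreOf s == k) := by
      rw [List.filter_map, List.map_map]
      simp only [Function.comp_def]
      have : (fun s => pvScoreA s == k) = (fun s => pvScoreOf s == k) := by
        funext s; rw [pvScore_eq]
      rw [this, List.map_id_fun']; rfl
    simp only [pvLevelsB, List.flatMap_cons]
    rw [pvTakeA_append, hbucket, ← pvPassB_filter]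
    by_cases h : (pvPassB m k parts acc).2
    · simp [h]
    · simp [h, ih]

theorem create_response_summary_py_eq (response : String) (max_tokens : Int) :
    create_response_summary_py response max_tokens = create_response_summary_py_alt response max_tokens := by
  unfold create_response_summary_py create_response_summary_py_alt
  dsimp only
  generalize PySem.Chars.splitOn (PySem.Chars.replace response.toList ['\n'] [' ']) ('.' :: ' ' :: []) = parts
  have hks : (PySem.List.pyRange 10 (-1) (-1)).Pairwise (fun a b => b < a) := by decide
  have hmem : ∀ p ∈ parts.map (fun s => (pvScoreA s, s)),
      p.1 ∈ PySem.List.pyRange 10 (-1) (-1) := by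
    intro p hp
    obtain ⟨s, _, rfl⟩ := List.mem_map.mp hp
    have hb : 0 ≤ pvScoreOf s ∧ pvScoreOf s ≤ 10 := pvScore_bounds s
    show pvScoreA s ∈ PySem.List.pyRange 10 (-1) (-1)
    rw [pvScore_eq]
    have hlit : PySem.List.pyRange 10 (-1) (-1) = [10,9,8,7,6,5,4,3,2,1,0] := by decide
    rw [hlit]
    simp only [List.mem_cons, List.not_mem_nil, or_false]
    omega
  rw [pvSorted_eq_flatMap (key := fun x : Int × List Char => x.1)
        (l := parts.map (fun s => (pvScoreA s, s)))
        (ks := PySem.List.pyRange 10 (-1) (-1)) hks hmem,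
    ← pvLevelsB_eq]

-- ===== VERDICT (by name: the statement is the Claim_ definition above) =====
theorem create_response_summary_py_spec : Claim_equal_create_response_summary_py := by
  intro response max_tokens _
  unfold Spec_create_response_summary_py
  exact create_response_summary_py_eq response max_tokens
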